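-- pv_equiv track=rewrite | github.com/Techayguy01/KIOSK_FRONTEND_V1 | KIOSK_BACKEND_V2_PYTHON/test_live_intent_routing.py | _room_guest_mix
-- ===== SOURCE A (Python) =====
-- from typing import Any
--
-- def _as_int(value: Any, default: int = 0) -> int:
--     try:
--         if value is None:
--             return default
--         return int(value)
--     except (TypeError, ValueError):
--         return default
--
-- def _room_max_adults(room: dict[str, Any]) -> int:
--     return _as_int(room.get("maxAdults") or room.get("maxTotalGuests"), 2)
--
-- def _room_max_children(room: dict[str, Any]) -> int:
--     return _as_int(room.get("maxChildren"), 0)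
--
-- def _room_total_capacity(room: dict[str, Any]) -> int:
--     total = _as_int(room.get("maxTotalGuests"), 0)
--     if total > 0:
--         return total
--     return _room_max_adults(room) + _room_max_children(room)
--
-- def _room_guest_mix(
--     room: dict[str, Any],
--     preferred_adults: int,
--     preferred_children: int = 0,
-- ) -> tuple[int, int]:
--     adults_cap = max(1, _room_max_adults(room))
--     children_cap = max(0, _room_max_children(room))
--     total_cap = max(1, _room_total_capacity(room))
--
--     adults = min(max(1, preferred_adults), adults_cap)
--     children = min(max(0, preferred_children), children_cap)
--
--     while adults + children > total_cap and children > 0: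
--         children -= 1
--     while adults + children > total_cap and adults > 1:
--         adults -= 1
--
--     return adults, children
-- ===== SOURCE B (Python) =====
-- def _room_guest_mix(room, preferred_adults, preferred_children=0):
--     ma = room.get("maxAdults") or room.get("maxTotalGuests")
--     ma = 2 if ma is None else ma
--     mc = room.get("maxChildren")
--     mc = 0 if mc is None else mc
--     tg = room.get("maxTotalGuests")
--     tg = 0 if tg is None else tg
--     total = tg if tg > 0 else ma + mc
--     adults_cap = max(1, ma)
--     children_cap = max(0, mc)
--     total_cap = max(1, total)
--     adults = min(max(1, preferred_adults), adults_cap)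
--     children = min(max(0, preferred_children), children_cap, max(0, total_cap - adults))
--     adults = min(adults, max(1, total_cap - children))
--     return adults, children
-- ===== Notes on version B (the rewrite author's own statement) =====
-- stated objective: alternative
-- what changed: Replaces A's two decrement-by-one while loops (shedding one child/adult per iteration until total capacity is met) with closed-form min/max arithmetic clamping; capacity lookups are unchanged.
import Mathlib
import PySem

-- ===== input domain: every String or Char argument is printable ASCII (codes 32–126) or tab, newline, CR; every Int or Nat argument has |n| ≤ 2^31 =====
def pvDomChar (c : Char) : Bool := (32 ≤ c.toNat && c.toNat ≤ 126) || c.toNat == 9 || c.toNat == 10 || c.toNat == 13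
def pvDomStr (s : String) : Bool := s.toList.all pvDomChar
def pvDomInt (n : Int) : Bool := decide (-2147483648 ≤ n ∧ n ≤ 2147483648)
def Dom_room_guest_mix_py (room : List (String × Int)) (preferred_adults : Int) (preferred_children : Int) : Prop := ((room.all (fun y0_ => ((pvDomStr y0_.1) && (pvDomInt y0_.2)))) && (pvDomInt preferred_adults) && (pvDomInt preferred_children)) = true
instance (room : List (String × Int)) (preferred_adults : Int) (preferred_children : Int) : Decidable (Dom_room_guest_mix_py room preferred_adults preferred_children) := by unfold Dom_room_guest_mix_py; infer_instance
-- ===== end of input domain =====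

-- B replaces A's two decrement-by-one while loops with closed-form min/max clamping; the capacity
-- lookups are the same.

-- shared primitive: Python dict.get on the association list (first match)
def pvGet? : List (String × Int) → String → Option Int
  | [], _ => none
  | (k, v) :: rest, key => if k = key then some v else pvGet? rest key

-- ===== PORT A =====
-- _as_int(value, default): here every stored value is an int, so int(value) = value
def pvAsIntA (value : Option Int) (dflt : Int) : Int :=
  match value with
  | none => dflt
  | some n => n

-- room.get("maxAdults") or room.get("maxTotalGuests")   (Python 'or': some 0 is falsy)
def pvRoomMaxAdultsA (room : List (String × Int)) : Int :=
  let orv :=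
    match pvGet? room "maxAdults" with
    | some v => if v ≠ 0 then some v else pvGet? room "maxTotalGuests"
    | none => pvGet? room "maxTotalGuests"
  pvAsIntA orv 2

def pvRoomMaxChildrenA (room : List (String × Int)) : Int :=
  pvAsIntA (pvGet? room "maxChildren") 0

def pvRoomTotalCapacityA (room : List (String × Int)) : Int :=
  let total := pvAsIntA (pvGet? room "maxTotalGuests") 0
  if total > 0 then total else pvRoomMaxAdultsA room + pvRoomMaxChildrenA room

-- while adults + children > total_cap and children > 0: children -= 1
def pvChildLoopA (adults children total_cap : Int) : Int :=
  if adults + children > total_cap ∧ children > 0 then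
    pvChildLoopA adults (children - 1) total_cap
  else children
termination_by children.toNat
decreasing_by omega

-- while adults + children > total_cap and adults > 1: adults -= 1
def pvAdultLoopA (adults children total_cap : Int) : Int :=
  if adults + children > total_cap ∧ adults > 1 then
    pvAdultLoopA (adults - 1) children total_cap
  else adults
termination_by adults.toNat
decreasing_by omega

def room_guest_mix_py (room : List (String × Int)) (preferred_adults : Int) (preferred_children : Int) : Int × Int :=
  let adults_cap := max 1 (pvRoomMaxAdultsA room)
  let children_cap := max 0 (pvRoomMaxChildrenA room)
  let total_cap := max 1 (pvRoomTotalCapacityA room)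
  let adults := min (max 1 preferred_adults) adults_cap
  let children := min (max 0 preferred_children) children_cap
  let children := pvChildLoopA adults children total_cap
  let adults := pvAdultLoopA adults children total_cap
  (adults, children)

-- ===== PORT B =====
def room_guest_mix_py_alt (room : List (String × Int)) (preferred_adults : Int) (preferred_children : Int) : Int × Int :=
  let ma := match pvGet? room "maxAdults" with
            | some v => if v ≠ 0 then some v else pvGet? room "maxTotalGuests"
            | none => pvGet? room "maxTotalGuests"
  let ma := match ma with | none => 2 | some v => v
  let mc := match pvGet? room "maxChildren" with | none => 0 | some v => v
  let tg := match pvGet? room "maxTotalGuests" with | none => 0 | some v => v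
  let total := if tg > 0 then tg else ma + mc
  let adults_cap := max 1 ma
  let children_cap := max 0 mc
  let total_cap := max 1 total
  let adults := min (max 1 preferred_adults) adults_cap
  let children := min (min (max 0 preferred_children) children_cap) (max 0 (total_cap - adults))
  let adults := min adults (max 1 (total_cap - children))
  (adults, children)

-- ===== PRECONDITION & SPEC =====
def Spec_room_guest_mix_py (room : List (String × Int)) (preferred_adults : Int) (preferred_children : Int) (out : Int × Int) : Prop := out = room_guest_mix_py_alt room preferred_adults preferred_children
instance (room : List (String × Int)) (preferred_adults : Int) (preferred_children : Int) (out : Int × Int) : Decidable (Spec_room_guest_mix_py room preferred_adults preferred_children out) := by unfold Spec_room_guest_mix_py; infer_instance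

-- ===== CLAIM (what is proved, stated in full; the proofs are below) =====
def Claim_equal_room_guest_mix_py : Prop := ∀ (room : List (String × Int)) (preferred_adults : Int) (preferred_children : Int), Dom_room_guest_mix_py room preferred_adults preferred_children → Spec_room_guest_mix_py room preferred_adults preferred_children (room_guest_mix_py room preferred_adults preferred_children)

-- ===== LEMMAS AND PROOFS =====
lemma pvChildLoopA_eq (a c t : Int) : 0 ≤ c → pvChildLoopA a c t = min c (max 0 (t - a)) := by
  fun_induction pvChildLoopA a c t with
  | case1 _ h ih => intro hc; have := ih (by omega); omega
  | case2 _ h => intro hc; omega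

lemma pvAdultLoopA_eq (a c t : Int) : 1 ≤ a → pvAdultLoopA a c t = min a (max 1 (t - c)) := by
  fun_induction pvAdultLoopA a c t with
  | case1 _ h ih => intro ha; have := ih (by omega); omega
  | case2 _ h => intro ha; omega

-- both ports, with the three capacity numbers abstracted out
lemma pvClampCore (MA MC T pa pc : Int) :
    (pvAdultLoopA (min (max 1 pa) (max 1 MA))
        (pvChildLoopA (min (max 1 pa) (max 1 MA)) (min (max 0 pc) (max 0 MC)) (max 1 T)) (max 1 T),
     pvChildLoopA (min (max 1 pa) (max 1 MA)) (min (max 0 pc) (max 0 MC)) (max 1 T))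
    =
    (min (min (max 1 pa) (max 1 MA))
        (max 1 (max 1 T - min (min (max 0 pc) (max 0 MC)) (max 0 (max 1 T - min (max 1 pa) (max 1 MA))))),
     min (min (max 0 pc) (max 0 MC)) (max 0 (max 1 T - min (max 1 pa) (max 1 MA)))) := by
  rw [pvChildLoopA_eq _ _ _ (by omega), pvAdultLoopA_eq _ _ _ (by omega)]

-- ===== VERDICT (by name: the statement is the Claim_ definition above) =====
theorem room_guest_mix_py_spec : Claim_equal_room_guest_mix_py := by
  intro room pa pc _
  exact pvClampCore (pvRoomMaxAdultsA room) (pvRoomMaxChildrenA room) (pvRoomTotalCapacityA room) pa pc
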